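-- pv_equiv track=rewrite | github.com/kunal9211pandey/Greek-For-Greek-DSA-Problem-With-Solution | Difficulty: Basic/Max Odd Sum/max-odd-sum.py | findMaxOddSum
-- ===== SOURCE A (Python) =====
-- def findMaxOddSum(arr):
--     total_sum = 0
--     min_positive_odd = float('inf')
--     max_negative_odd = float('-inf')
--
--     for num in arr:
--         if num > 0:
--             total_sum += num
--             if num % 2 != 0:
--                 min_positive_odd = min(min_positive_odd, num)
--         else:
--             if num % 2 != 0:
--                 max_negative_odd = max(max_negative_odd, num)
--
--     # if total sum is already odd
--     if total_sum % 2 != 0: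
--         return total_sum
--
--     ans = -1
--
--     # option 1: remove smallest positive odd
--     if min_positive_odd != float('inf'):
--         ans = max(ans, total_sum - min_positive_odd)
--
--     # option 2: add largest negative odd
--     if max_negative_odd != float('-inf'):
--         ans = max(ans, total_sum + max_negative_odd)
--
--     return ans
-- ===== SOURCE B (Python) =====
-- def findMaxOddSum(arr):
--     # Parity dynamic programming: best_even / best_odd = maximum subset sum of that
--     # parity seen so far (None = no odd-sum subset yet; empty subset gives even 0).
--     best_even = 0
--     best_odd = None
--     for n in arr:
--         if n % 2 == 0:
--             cand_even = best_even + n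
--             cand_odd = None if best_odd is None else best_odd + n
--         else:
--             cand_even = None if best_odd is None else best_odd + n
--             cand_odd = best_even + n
--         if cand_even is not None and cand_even > best_even:
--             best_even = cand_even
--         if cand_odd is not None and (best_odd is None or cand_odd > best_odd):
--             best_odd = cand_odd
--     return -1 if best_odd is None else max(best_odd, -1)
-- ===== Notes on version B (the rewrite author's own statement) =====
-- stated objective: alternative
-- what changed: Replaces A's greedy single pass (sum the positives, then drop the smallest positive odd or add the largest negative odd) with a parity dynamic program that carries the best even-sum and best odd-sum subset achievable so far and updates both on each element.
import Mathlib
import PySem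

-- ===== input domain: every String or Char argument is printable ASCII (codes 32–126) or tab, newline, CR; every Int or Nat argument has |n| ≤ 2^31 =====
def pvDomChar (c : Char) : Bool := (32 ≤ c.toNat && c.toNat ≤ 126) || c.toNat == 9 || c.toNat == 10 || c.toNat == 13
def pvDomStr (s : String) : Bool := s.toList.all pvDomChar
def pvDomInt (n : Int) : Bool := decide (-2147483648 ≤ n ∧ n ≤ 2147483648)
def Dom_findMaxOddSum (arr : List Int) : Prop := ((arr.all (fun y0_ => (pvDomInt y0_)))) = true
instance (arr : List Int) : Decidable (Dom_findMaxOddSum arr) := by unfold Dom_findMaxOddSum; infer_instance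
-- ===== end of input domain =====

-- B replaces A's greedy (sum of positives, then drop the min positive odd or add the max negative
-- odd) by a parity dynamic program tracking the best even/odd subset sum (objective: alternative;
-- both O(n), no speed claim).

-- ===== PORT A =====
-- A's loop state (total_sum, min_positive_odd, max_negative_odd); the float('±inf') sentinels
-- are Option.none.
def findMaxOddSumLoop : List Int → Int × Option Int × Option Int → Int × Option Int × Option Int
  | [], st => st
  | n :: t, (s, mp, mn) =>
    if n > 0 then
      findMaxOddSumLoop t (s + n,
        (if PySem.Int.mod n 2 ≠ 0 then
          some (match mp with | none => n | some m => min m n) else mp), mn)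
    else
      findMaxOddSumLoop t (s, mp,
        (if PySem.Int.mod n 2 ≠ 0 then
          some (match mn with | none => n | some m => max m n) else mn))

def findMaxOddSum (arr : List Int) : Int :=
  let st := findMaxOddSumLoop arr (0, none, none)
  if PySem.Int.mod st.1 2 ≠ 0 then st.1
  else
    let ans : Int := -1
    let ans := match st.2.1 with | none => ans | some m => max ans (st.1 - m)
    let ans := match st.2.2 with | none => ans | some m => max ans (st.1 + m)
    ans

-- ===== PORT B =====
-- Source B's loop body: one DP step on the state (best_even, best_odd); best_odd = none means
-- no odd-sum subset has been achievable yet.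
def dpStep (st : Int × Option Int) (n : Int) : Int × Option Int :=
  let be := st.1
  let bo := st.2
  let c : Option Int × Option Int :=
    if PySem.Int.mod n 2 = 0 then
      (some (be + n), Option.map (· + n) bo)
    else
      (Option.map (· + n) bo, some (be + n))
  let be' := match c.1 with | none => be | some v => if v > be then v else be
  let bo' := match c.2 with
    | none => bo
    | some v => match bo with | none => some v | some o => if v > o then some v else some o
  (be', bo')

def findMaxOddSum_alt (arr : List Int) : Int :=
  let st := arr.foldl dpStep (0, none)
  match st.2 with
  | none => -1
  | some o => max o (-1)

-- ===== PRECONDITION & SPEC =====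
def Spec_findMaxOddSum (arr : List Int) (out : Int) : Prop := out = findMaxOddSum_alt arr
instance (arr : List Int) (out : Int) : Decidable (Spec_findMaxOddSum arr out) := by unfold Spec_findMaxOddSum; infer_instance

-- ===== CLAIM (what is proved, stated in full; the proofs are below) =====
def Claim_equal_findMaxOddSum : Prop := ∀ (arr : List Int), Dom_findMaxOddSum arr → Spec_findMaxOddSum arr (findMaxOddSum arr)

-- ===== LEMMAS AND PROOFS =====

lemma pymod2 (a : Int) : PySem.Int.mod a 2 = a % 2 :=
  PySem.Int.mod_eq_emod_of_pos (by norm_num)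

-- merge of two optional minima / maxima (none = "not seen yet")
def omin : Option Int → Option Int → Option Int
  | none, b => b
  | some x, none => some x
  | some x, some y => some (min x y)

def omax : Option Int → Option Int → Option Int
  | none, b => b
  | some x, none => some x
  | some x, some y => some (max x y)

lemma omin_none_left (b : Option Int) : omin none b = b := rfl
lemma omax_none_left (b : Option Int) : omax none b = b := rfl
lemma omin_none_right (a : Option Int) : omin a none = a := by cases a <;> rfl
lemma omax_none_right (a : Option Int) : omax a none = a := by cases a <;> rfl

lemma omin_assoc (a b c : Option Int) : omin (omin a b) c = omin a (omin b c) := by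
  cases a <;> cases b <;> cases c <;> simp [omin, min_assoc]

lemma omax_assoc (a b c : Option Int) : omax (omax a b) c = omax a (omax b c) := by
  cases a <;> cases b <;> cases c <;> simp [omax, max_assoc]

-- A's running-min/-max updates are merges
lemma omin_merge (mp : Option Int) (n : Int) :
    (some (match mp with | none => n | some m => min m n) : Option Int) = omin mp (some n) := by
  cases mp <;> rfl

lemma omax_merge (mn : Option Int) (n : Int) :
    (some (match mn with | none => n | some m => max m n) : Option Int) = omax mn (some n) := by
  cases mn <;> rfl

-- spec-side quantities: positive sum, min positive odd, max non-positive odd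
def sumPos (arr : List Int) : Int := (arr.filter (fun n => decide (n > 0))).sum

def minPosOdd : List Int → Option Int
  | [] => none
  | n :: t =>
    if n > 0 ∧ n % 2 ≠ 0 then omin (some n) (minPosOdd t) else minPosOdd t

def maxNegOdd : List Int → Option Int
  | [] => none
  | n :: t =>
    if ¬ n > 0 ∧ n % 2 ≠ 0 then omax (some n) (maxNegOdd t) else maxNegOdd t

lemma sumPos_cons_pos {n : Int} (t : List Int) (hp : n > 0) :
    sumPos (n :: t) = n + sumPos t := by
  simp [sumPos, hp]

lemma sumPos_cons_nonpos {n : Int} (t : List Int) (hp : ¬ n > 0) :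
    sumPos (n :: t) = sumPos t := by
  simp [sumPos, hp]

-- A's loop computes exactly (sumPos, minPosOdd, maxNegOdd)
lemma loop_eq (arr : List Int) : ∀ s mp mn,
    findMaxOddSumLoop arr (s, mp, mn) =
      (s + sumPos arr, omin mp (minPosOdd arr), omax mn (maxNegOdd arr)) := by
  induction arr with
  | nil =>
    intro s mp mn
    simp [findMaxOddSumLoop, sumPos, minPosOdd, maxNegOdd, omin_none_right, omax_none_right]
  | cons n t ih =>
    intro s mp mn
    have step : findMaxOddSumLoop (n :: t) (s, mp, mn) =
        if n > 0 then
          findMaxOddSumLoop t (s + n,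
            (if PySem.Int.mod n 2 ≠ 0 then
              some (match mp with | none => n | some m => min m n) else mp), mn)
        else
          findMaxOddSumLoop t (s, mp,
            (if PySem.Int.mod n 2 ≠ 0 then
              some (match mn with | none => n | some m => max m n) else mn)) := rfl
    rw [step]
    by_cases hp : n > 0
    · rw [if_pos hp, sumPos_cons_pos t hp]
      by_cases ho : n % 2 ≠ 0
      · rw [if_pos (by rwa [pymod2]), omin_merge, ih,
          show minPosOdd (n :: t) = omin (some n) (minPosOdd t) from by
            rw [minPosOdd]; exact if_pos ⟨hp, ho⟩,
          show maxNegOdd (n :: t) = maxNegOdd t from by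
            rw [maxNegOdd]; exact if_neg (fun h => h.1 hp)]
        simp [omin_assoc, add_assoc]
      · rw [if_neg (by simpa [pymod2] using ho), ih,
          show minPosOdd (n :: t) = minPosOdd t from by
            rw [minPosOdd]; exact if_neg (fun h => ho h.2),
          show maxNegOdd (n :: t) = maxNegOdd t from by
            rw [maxNegOdd]; exact if_neg (fun h => ho h.2)]
        simp [add_assoc]
    · rw [if_neg hp, sumPos_cons_nonpos t hp]
      by_cases ho : n % 2 ≠ 0
      · rw [if_pos (by rwa [pymod2]), omax_merge, ih,
          show minPosOdd (n :: t) = minPosOdd t from by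
            rw [minPosOdd]; exact if_neg (fun h => hp h.1),
          show maxNegOdd (n :: t) = omax (some n) (maxNegOdd t) from by
            rw [maxNegOdd]; exact if_pos ⟨hp, ho⟩]
        simp [omax_assoc]
      · rw [if_neg (by simpa [pymod2] using ho), ih,
          show minPosOdd (n :: t) = minPosOdd t from by
            rw [minPosOdd]; exact if_neg (fun h => ho h.2),
          show maxNegOdd (n :: t) = maxNegOdd t from by
            rw [maxNegOdd]; exact if_neg (fun h => ho h.2)]

-- append-singleton laws for the spec-side quantities
lemma sumPos_append (l : List Int) (n : Int) :
    sumPos (l ++ [n]) = sumPos l + (if n > 0 then n else 0) := by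
  unfold sumPos
  rw [List.filter_append, List.sum_append]
  by_cases hp : n > 0 <;> simp [List.filter, hp]

lemma minPosOdd_append (l : List Int) (n : Int) :
    minPosOdd (l ++ [n]) =
      if n > 0 ∧ n % 2 ≠ 0 then omin (minPosOdd l) (some n) else minPosOdd l := by
  induction l with
  | nil => by_cases h : n > 0 ∧ n % 2 ≠ 0 <;> simp [minPosOdd, h, omin]
  | cons m t ih =>
    show (if m > 0 ∧ m % 2 ≠ 0 then omin (some m) (minPosOdd (t ++ [n]))
          else minPosOdd (t ++ [n])) = _
    rw [ih]
    show _ = if n > 0 ∧ n % 2 ≠ 0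
        then omin (if m > 0 ∧ m % 2 ≠ 0 then omin (some m) (minPosOdd t) else minPosOdd t) (some n)
        else if m > 0 ∧ m % 2 ≠ 0 then omin (some m) (minPosOdd t) else minPosOdd t
    by_cases hm : m > 0 ∧ m % 2 ≠ 0 <;> by_cases hn : n > 0 ∧ n % 2 ≠ 0
    · simp only [if_pos hm, if_pos hn]; rw [omin_assoc]
    · simp only [if_pos hm, if_neg hn]
    · simp only [if_neg hm, if_pos hn]
    · simp only [if_neg hm, if_neg hn]

lemma maxNegOdd_append (l : List Int) (n : Int) :
    maxNegOdd (l ++ [n]) =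
      if ¬ n > 0 ∧ n % 2 ≠ 0 then omax (maxNegOdd l) (some n) else maxNegOdd l := by
  induction l with
  | nil => by_cases h : ¬ n > 0 ∧ n % 2 ≠ 0 <;> simp [maxNegOdd, h, omax]
  | cons m t ih =>
    show (if ¬ m > 0 ∧ m % 2 ≠ 0 then omax (some m) (maxNegOdd (t ++ [n]))
          else maxNegOdd (t ++ [n])) = _
    rw [ih]
    show _ = if ¬ n > 0 ∧ n % 2 ≠ 0
        then omax (if ¬ m > 0 ∧ m % 2 ≠ 0 then omax (some m) (maxNegOdd t) else maxNegOdd t) (some n)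
        else if ¬ m > 0 ∧ m % 2 ≠ 0 then omax (some m) (maxNegOdd t) else maxNegOdd t
    by_cases hm : ¬ m > 0 ∧ m % 2 ≠ 0 <;> by_cases hn : ¬ n > 0 ∧ n % 2 ≠ 0
    · simp only [if_pos hm, if_pos hn]; rw [omax_assoc]
    · simp only [if_pos hm, if_neg hn]
    · simp only [if_neg hm, if_pos hn]
    · simp only [if_neg hm, if_neg hn]

-- the best parity-pflip of the positive sum S: drop a positive odd m (S - m) or add a
-- non-positive odd m (S + m)
def pflip (S : Int) (mp mn : Option Int) : Option Int :=
  omax (Option.map (fun m => S - m) mp) (Option.map (fun m => S + m) mn)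

-- closed form of B's DP state in terms of A's quantities
def dpSpec (S : Int) (mp mn : Option Int) : Int × Option Int :=
  if S % 2 = 0 then (S, pflip S mp mn) else ((pflip S mp mn).getD 0, some S)

-- invariant facts about the spec-side quantities
lemma sumPos_nonneg (arr : List Int) : 0 ≤ sumPos arr := by
  induction arr with
  | nil => simp [sumPos]
  | cons n t ih =>
    by_cases hp : n > 0
    · rw [sumPos_cons_pos t hp]; omega
    · rw [sumPos_cons_nonpos t hp]; exact ih

lemma minPosOdd_pos (arr : List Int) : ∀ m, minPosOdd arr = some m → 0 < m := by
  induction arr with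
  | nil => intro m h; simp [minPosOdd] at h
  | cons n t ih =>
    intro m h
    rw [minPosOdd] at h
    by_cases hc : n > 0 ∧ n % 2 ≠ 0
    · rw [if_pos hc] at h
      cases ht : minPosOdd t with
      | none => rw [ht, omin_none_right] at h; cases h; exact hc.1
      | some q =>
        rw [ht] at h
        simp [omin] at h
        have := ih q ht
        omega
    · rw [if_neg hc] at h; exact ih m h

lemma maxNegOdd_nonpos (arr : List Int) : ∀ m, maxNegOdd arr = some m → m ≤ 0 := by
  induction arr with
  | nil => intro m h; simp [maxNegOdd] at h
  | cons n t ih =>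
    intro m h
    rw [maxNegOdd] at h
    by_cases hc : ¬ n > 0 ∧ n % 2 ≠ 0
    · rw [if_pos hc] at h
      cases ht : maxNegOdd t with
      | none => rw [ht, omax_none_right] at h; cases h; omega
      | some q =>
        rw [ht] at h
        simp [omax] at h
        have := ih q ht
        have := hc.1
        omega
    · rw [if_neg hc] at h; exact ih m h

lemma odd_sum_has_odd (arr : List Int) : sumPos arr % 2 = 1 → minPosOdd arr ≠ none := by
  induction arr with
  | nil => intro h; simp [sumPos] at h
  | cons n t ih =>
    intro h
    by_cases hp : n > 0
    · rw [sumPos_cons_pos t hp] at h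
      by_cases ho : n % 2 ≠ 0
      · rw [minPosOdd, if_pos ⟨hp, ho⟩]
        cases minPosOdd t <;> simp [omin]
      · rw [minPosOdd, if_neg (fun hc => ho hc.2)]
        exact ih (by omega)
    · rw [sumPos_cons_nonpos t hp] at h
      rw [minPosOdd, if_neg (fun hc => hp hc.1)]
      exact ih h

-- one DP step preserves the closed form
lemma dpStep_spec (S : Int) (mp mn : Option Int) (n : Int)
    (hS : 0 ≤ S)
    (hmp : ∀ m, mp = some m → 0 < m)
    (hmn : ∀ m, mn = some m → m ≤ 0)
    (hodd : S % 2 = 1 → mp ≠ none) :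
    dpStep (dpSpec S mp mn) n =
      dpSpec (S + (if n > 0 then n else 0))
        (if n > 0 ∧ n % 2 ≠ 0 then omin mp (some n) else mp)
        (if ¬ n > 0 ∧ n % 2 ≠ 0 then omax mn (some n) else mn) := by
  have hS2 : S % 2 = 0 ∨ S % 2 = 1 := by omega
  have hn2 : n % 2 = 0 ∨ n % 2 = 1 := by omega
  rcases mp with _ | m₁ <;> rcases mn with _ | m₂ <;>
    [skip;
     (have hm₂ := hmn m₂ rfl);
     (have hm₁ := hmp m₁ rfl);
     (have hm₁ := hmp m₁ rfl; have hm₂ := hmn m₂ rfl)] <;>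
    rcases hS2 with hS2 | hS2 <;> rcases hn2 with hn2 | hn2 <;>
    first
    | (exact absurd rfl (hodd hS2))
    | (clear hodd hmp hmn <;> by_cases hp : n > 0 <;>
        simp [dpStep, dpSpec, pflip, omin, omax, pymod2, hp, hn2, hS2,
          -EuclideanDomain.mod_eq_zero] <;>
        (try split_ifs) <;>
        (try simp only [Prod.mk.injEq, Option.some.injEq, true_and, and_true,
          max_def, min_def]) <;>
        (try split_ifs) <;>
        first
        | omega
        | linarith
        | (refine ⟨by first | omega | linarith, fun hlt => by
            first | omega | linarith | (exfalso; linarith)⟩)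
        | (rcases not_and_or.mp (by assumption) with hna | hna <;>
            refine ⟨by linarith, fun hlt => by first | linarith | (exfalso; linarith)⟩))

-- B's fold computes the closed form
lemma dp_char (arr : List Int) :
    arr.foldl dpStep (0, none) = dpSpec (sumPos arr) (minPosOdd arr) (maxNegOdd arr) := by
  induction arr using List.reverseRecOn with
  | nil => simp [sumPos, minPosOdd, maxNegOdd, dpSpec, pflip, omax]
  | append_singleton l n ih =>
    rw [List.foldl_append, List.foldl_cons, List.foldl_nil, ih,
      dpStep_spec (sumPos l) (minPosOdd l) (maxNegOdd l) n (sumPos_nonneg l)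
        (minPosOdd_pos l) (maxNegOdd_nonpos l) (odd_sum_has_odd l),
      sumPos_append, minPosOdd_append, maxNegOdd_append]

-- ===== VERDICT (by name: the statement is the Claim_ definition above) =====
theorem findMaxOddSum_spec : Claim_equal_findMaxOddSum := by
  intro arr _
  show findMaxOddSum arr = findMaxOddSum_alt arr
  unfold findMaxOddSum findMaxOddSum_alt
  rw [loop_eq, dp_char]
  simp only [omin_none_left, omax_none_left, zero_add]
  have hS := sumPos_nonneg arr
  have hS2 : sumPos arr % 2 = 0 ∨ sumPos arr % 2 = 1 := by omega
  rcases hS2 with hS2 | hS2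
  · rcases hmp : minPosOdd arr with _ | m₁ <;> rcases hmn : maxNegOdd arr with _ | m₂ <;>
      simp [dpSpec, pflip, omax, pymod2, hS2] <;>
        first
        | omega
        | exact max_comm _ _
        | exact max_assoc _ _ _
        | exact (max_comm _ _).trans (max_assoc _ _ _)
  · have hne := odd_sum_has_odd arr hS2
    rcases hmp : minPosOdd arr with _ | m₁
    · exact absurd rfl (hmp ▸ hne)
    · rcases hmn : maxNegOdd arr with _ | m₂ <;>
        simp [dpSpec, pflip, omax, pymod2, hS2] <;>
        first
        | omega
        | exact max_comm _ _
        | exact max_assoc _ _ _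
        | exact (max_comm _ _).trans (max_assoc _ _ _)
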